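-- pv_equiv track=rewrite | github.com/hoolagin6/cc | stream_convert_bulk.py | calculate_resolution
-- ===== SOURCE A (Python) =====
-- def calculate_resolution(w_blocks, h_blocks):
--     # Width increments: 21, 21, 22, 21, 21, 22, 21...
--     w_inc = [21, 21, 22, 21, 21, 22, 21]
--     target_w = 15
--     for i in range(min(w_blocks - 1, len(w_inc))):
--         target_w += w_inc[i]
--     if w_blocks > 8: target_w += (w_blocks - 8) * 21
--
--     # Height increments: 14, 14, 14, 15, 14...
--     h_inc = [14, 14, 14, 15, 14]
--     target_h = 10
--     for i in range(min(h_blocks - 1, len(h_inc))):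
--         target_h += h_inc[i]
--     if h_blocks > 6: target_h += (h_blocks - 6) * 14
--
--     return target_w, target_h
-- ===== SOURCE B (Python) =====
-- def calculate_resolution(w_blocks, h_blocks):
--     # Closed-form arithmetic: each width block adds 21 with an extra pixel
--     # every third increment (22 at positions 2 and 5); each height block adds
--     # 14 with an extra pixel at position 3.  Clamp to the tabulated 8/6 blocks,
--     # then extrapolate linearly beyond.
--     kw = max(0, min(w_blocks - 1, 7))
--     target_w = 15 + 21 * kw + kw // 3
--     if w_blocks > 8:
--         target_w += (w_blocks - 8) * 21
--     kh = max(0, min(h_blocks - 1, 5))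
--     target_h = 10 + 14 * kh + kh // 4
--     if h_blocks > 6:
--         target_h += (h_blocks - 6) * 14
--     return (target_w, target_h)
-- ===== Notes on version B (the rewrite author's own statement) =====
-- stated objective: simpler
-- what changed: Replaces the accumulation loops over increment lists with a pure closed-form arithmetic formula (base + per-block step + floor-division correction for the occasional larger increment), no lists or loops at all.
import Mathlib
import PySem

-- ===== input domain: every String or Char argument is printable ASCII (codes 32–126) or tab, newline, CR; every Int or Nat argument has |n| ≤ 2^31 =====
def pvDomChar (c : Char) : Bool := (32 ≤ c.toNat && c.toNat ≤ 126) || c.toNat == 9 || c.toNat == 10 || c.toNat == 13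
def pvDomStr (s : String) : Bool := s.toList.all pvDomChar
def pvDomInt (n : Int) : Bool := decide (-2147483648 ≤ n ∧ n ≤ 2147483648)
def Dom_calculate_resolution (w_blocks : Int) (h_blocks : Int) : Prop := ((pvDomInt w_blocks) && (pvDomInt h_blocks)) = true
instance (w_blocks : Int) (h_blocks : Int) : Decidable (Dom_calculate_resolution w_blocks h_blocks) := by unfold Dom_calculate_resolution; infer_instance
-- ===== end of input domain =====

-- B replaces A's per-block accumulation loops with a loop-free closed-form arithmetic formula (objective: simpler).


-- ===== PORT A =====
-- Literal port of A: fold over range(min(blocks-1, len(inc))) accumulating increments.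
def calculate_resolution (w_blocks : Int) (h_blocks : Int) : Int × Int :=
  let w_inc : List Int := [21, 21, 22, 21, 21, 22, 21]
  let target_w : Int :=
    (PySem.List.pyRange 0 (min (w_blocks - 1) 7) 1).foldl
      (fun acc i => acc + PySem.List.pyGetD w_inc i 0) 15
  let target_w : Int := if w_blocks > 8 then target_w + (w_blocks - 8) * 21 else target_w
  let h_inc : List Int := [14, 14, 14, 15, 14]
  let target_h : Int :=
    (PySem.List.pyRange 0 (min (h_blocks - 1) 5) 1).foldl
      (fun acc i => acc + PySem.List.pyGetD h_inc i 0) 10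
  let target_h : Int := if h_blocks > 6 then target_h + (h_blocks - 6) * 14 else target_h
  (target_w, target_h)

-- ===== PORT B =====
-- Port of B: clamp the block count, then a pure arithmetic formula (base + step·k + floor-division correction).
def calculate_resolution_alt (w_blocks : Int) (h_blocks : Int) : Int × Int :=
  let kw : Int := max 0 (min (w_blocks - 1) 7)
  let target_w : Int := 15 + 21 * kw + PySem.Int.floordiv kw 3
  let target_w : Int := if w_blocks > 8 then target_w + (w_blocks - 8) * 21 else target_w
  let kh : Int := max 0 (min (h_blocks - 1) 5)
  let target_h : Int := 10 + 14 * kh + PySem.Int.floordiv kh 4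
  let target_h : Int := if h_blocks > 6 then target_h + (h_blocks - 6) * 14 else target_h
  (target_w, target_h)

-- ===== PRECONDITION & SPEC =====
def Spec_calculate_resolution (w_blocks : Int) (h_blocks : Int) (out : Int × Int) : Prop := out = calculate_resolution_alt w_blocks h_blocks
instance (w_blocks : Int) (h_blocks : Int) (out : Int × Int) : Decidable (Spec_calculate_resolution w_blocks h_blocks out) := by unfold Spec_calculate_resolution; infer_instance

-- ===== CLAIM (what is proved, stated in full; the proofs are below) =====
def Claim_equal_calculate_resolution : Prop := ∀ (w_blocks : Int) (h_blocks : Int), Dom_calculate_resolution w_blocks h_blocks → Spec_calculate_resolution w_blocks h_blocks (calculate_resolution w_blocks h_blocks)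

-- ===== LEMMAS AND PROOFS =====
lemma width_eq (w : Int) :
    (PySem.List.pyRange 0 (min (w - 1) 7) 1).foldl
      (fun acc i => acc + PySem.List.pyGetD ([21, 21, 22, 21, 21, 22, 21] : List Int) i 0) 15
    = 15 + 21 * max 0 (min (w - 1) 7) + PySem.Int.floordiv (max 0 (min (w - 1) 7)) 3 := by
  by_cases h1 : w ≤ 1
  · rw [PySem.List.pyRange_one_eq_nil (by omega), show max 0 (min (w - 1) 7) = 0 by omega]
    decide
  · by_cases h8 : w ≤ 8
    · have h1' : 2 ≤ w := by omega
      interval_cases w <;> decide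
    · rw [show min (w - 1) 7 = 7 by omega, show max (0 : Int) 7 = 7 by decide]
      decide

lemma height_eq (h : Int) :
    (PySem.List.pyRange 0 (min (h - 1) 5) 1).foldl
      (fun acc i => acc + PySem.List.pyGetD ([14, 14, 14, 15, 14] : List Int) i 0) 10
    = 10 + 14 * max 0 (min (h - 1) 5) + PySem.Int.floordiv (max 0 (min (h - 1) 5)) 4 := by
  by_cases h1 : h ≤ 1
  · rw [PySem.List.pyRange_one_eq_nil (by omega), show max 0 (min (h - 1) 5) = 0 by omega]
    decide
  · by_cases h6 : h ≤ 6
    · have h1' : 2 ≤ h := by omega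
      interval_cases h <;> decide
    · rw [show min (h - 1) 5 = 5 by omega, show max (0 : Int) 5 = 5 by decide]
      decide

-- ===== VERDICT (by name: the statement is the Claim_ definition above) =====
theorem calculate_resolution_spec : Claim_equal_calculate_resolution := by
  intro w h _
  unfold Spec_calculate_resolution calculate_resolution calculate_resolution_alt
  simp only [width_eq, height_eq]
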